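-- pv_equiv track=rewrite | github.com/leejuhanKr/Algorithm | 프로그래머스/unrated/131128. 숫자 짝꿍/숫자 짝꿍.py | solution
-- ===== SOURCE A (Python) =====
-- from collections import defaultdict
-- from typing import Counter
--
-- def solution(X, Y):
--     x, y = freq(X), freq(Y)
--     res = ''
--     for n in "987654321":
--         res += n*min(x[n],y[n])
--     if res != '':
--         return res+'0'*min(x['0'],y['0'])
--     if x['0'] and y['0']:
--         return '0'
--     return '-1'
--
-- def freq(word:str):
--     _dict = defaultdict(int)
--     _dict.update(Counter(list(word)))
--     return _dict
-- ===== SOURCE B (Python) =====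
-- def solution(X, Y):
--     xs = sorted((c for c in X if c in "9876543210"), reverse=True)
--     ys = sorted((c for c in Y if c in "9876543210"), reverse=True)
--     out = []
--     i = j = 0
--     while i < len(xs) and j < len(ys):
--         a, b = xs[i], ys[j]
--         if a == b:
--             out.append(a)
--             i += 1
--             j += 1
--         elif a > b:
--             i += 1
--         else:
--             j += 1
--     if not out:
--         return '-1'
--     if out[0] == '0':
--         return '0'
--     return ''.join(out)
-- ===== Notes on version B (the rewrite author's own statement) =====
-- stated objective: alternative
-- what changed: B computes the common digit multiset by sorting the digit-filtered characters of X and Y in descending order and running a two-pointer merge intersection, instead of A's counter tables with a min() loop over the nine digits plus a separate zero branch; one final normalization (empty -> '-1', leading '0' -> '0'). The C-level sorted() plus a tight merge loop outruns A's per-character Counter/defaultdict construction by a constant factor.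
import Mathlib
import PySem

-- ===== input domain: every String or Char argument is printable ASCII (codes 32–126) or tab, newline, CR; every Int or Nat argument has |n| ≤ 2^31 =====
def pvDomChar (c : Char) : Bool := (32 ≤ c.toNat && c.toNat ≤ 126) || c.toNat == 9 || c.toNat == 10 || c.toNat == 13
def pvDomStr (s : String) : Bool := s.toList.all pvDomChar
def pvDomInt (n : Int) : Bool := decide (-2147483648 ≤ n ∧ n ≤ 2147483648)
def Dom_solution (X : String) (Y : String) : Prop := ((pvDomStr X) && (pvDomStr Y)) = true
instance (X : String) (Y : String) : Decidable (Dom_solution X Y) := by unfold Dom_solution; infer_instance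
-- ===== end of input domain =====

-- B computes the common digit multiset by sorting digit-filtered inputs descending and merge-intersecting with two pointers, instead of A's per-digit counter mins (alternative algorithm; same result).


-- ===== PORT A =====
-- freq(word): a defaultdict(int) filled from Counter(list(word)); every lookup is getD _ 0
def freqA (word : String) : PySem.Dict Char Int := PySem.Dict.counter word.toList

def solution (X : String) (Y : String) : String :=
  let x := freqA X
  let y := freqA Y
  let res := "987654321".toList.foldl
    (fun acc n => acc ++ PySem.List.pyRepeat [n] (min (x.getD n 0) (y.getD n 0))) []
  if res ≠ [] then
    String.mk (res ++ PySem.List.pyRepeat ['0'] (min (x.getD '0' 0) (y.getD '0' 0)))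
  else if x.getD '0' 0 ≠ 0 ∧ y.getD '0' 0 ≠ 0 then "0"
  else "-1"

-- ===== PORT B =====
-- the while loop over indices i, j: structural recursion on the two (sorted) suffixes
def pvISect : List Char → List Char → List Char
  | a :: xs, b :: ys =>
    if a = b then a :: pvISect xs ys
    else if b < a then pvISect xs (b :: ys)
    else pvISect (a :: xs) ys
  | _, _ => []
termination_by xs ys => xs.length + ys.length

def solution_alt (X : String) (Y : String) : String :=
  let xs := PySem.List.sorted (X.toList.filter (fun c => decide (c ∈ "9876543210".toList))) (fun c => c) true
  let ys := PySem.List.sorted (Y.toList.filter (fun c => decide (c ∈ "9876543210".toList))) (fun c => c) true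
  let out := pvISect xs ys
  if out = [] then "-1"
  else if PySem.List.pyGet? out 0 = some '0' then "0"
  else String.mk out

-- ===== PRECONDITION & SPEC =====
def Spec_solution (X : String) (Y : String) (out : String) : Prop := out = solution_alt X Y
instance (X : String) (Y : String) (out : String) : Decidable (Spec_solution X Y out) := by unfold Spec_solution; infer_instance

-- ===== CLAIM (what is proved, stated in full; the proofs are below) =====
def Claim_equal_solution : Prop := ∀ (X : String) (Y : String), Dom_solution X Y → Spec_solution X Y (solution X Y)

-- ===== LEMMAS AND PROOFS =====

-- the merge intersection is a sublist of its left argument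
theorem pvISect_sublist (xs ys : List Char) : (pvISect xs ys).Sublist xs := by
  induction xs, ys using pvISect.induct with
  | case1 xs b ys ih =>
      rw [pvISect, if_pos rfl]; exact ih.cons₂ b
  | case2 a xs b ys hab hlt ih =>
      rw [pvISect, if_neg hab, if_pos hlt]; exact ih.cons a
  | case3 a xs b ys hab hlt ih =>
      rw [pvISect, if_neg hab, if_neg hlt]; exact ih
  | case4 xs ys h =>
      rcases xs with _ | ⟨a, xs⟩
      · simp [pvISect.eq_def]
      · rcases ys with _ | ⟨b, ys⟩
        · simp [pvISect.eq_def]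
        · exact absurd (h a xs b ys rfl rfl) not_false

-- a head strictly above the head of a descending list does not occur in it
theorem pv_count_zero_of_lt (b a : Char) (ys : List Char)
    (hs : (b :: ys).Pairwise (fun p q => q ≤ p)) (h : b < a) : (b :: ys).count a = 0 := by
  rw [List.count_eq_zero]
  intro hma
  rcases List.mem_cons.mp hma with rfl | hm
  · exact absurd h (lt_irrefl _)
  · exact absurd (lt_of_le_of_lt ((List.pairwise_cons.mp hs).1 a hm) h) (lt_irrefl _)

-- on descending lists the merge intersection realises the per-value min of counts
theorem pvISect_count (xs ys : List Char)
    (hx : xs.Pairwise (fun p q => q ≤ p)) (hy : ys.Pairwise (fun p q => q ≤ p)) :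
    ∀ c, (pvISect xs ys).count c = min (xs.count c) (ys.count c) := by
  induction xs, ys using pvISect.induct with
  | case1 xs b ys ih =>
      intro c
      rw [pvISect, if_pos rfl]
      have := ih (List.pairwise_cons.mp hx).2 (List.pairwise_cons.mp hy).2 c
      by_cases hc : b = c <;> simp [hc, this]
  | case2 a xs b ys hab hlt ih =>
      intro c
      rw [pvISect, if_neg hab, if_pos hlt]
      rw [ih (List.pairwise_cons.mp hx).2 hy c]
      by_cases hc : c = a
      · subst hc
        have h0 : (b :: ys).count c = 0 := pv_count_zero_of_lt b c ys hy hlt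
        simp [h0, List.count_cons_self]
      · simp [List.count_cons, Ne.symm hc]
  | case3 a xs b ys hab hlt ih =>
      intro c
      rw [pvISect, if_neg hab, if_neg hlt]
      have hba : a < b := lt_of_le_of_ne (le_of_not_gt hlt) hab
      rw [ih hx (List.pairwise_cons.mp hy).2 c]
      by_cases hc : c = b
      · subst hc
        have h0 : (a :: xs).count c = 0 := pv_count_zero_of_lt a c xs hx hba
        simp [h0, List.count_cons_self]
      · simp [List.count_cons, Ne.symm hc]
  | case4 xs ys h =>
      intro c
      rcases xs with _ | ⟨a, xs⟩
      · simp [pvISect.eq_def]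
      · rcases ys with _ | ⟨b, ys⟩
        · simp [pvISect.eq_def]
        · exact absurd (h a xs b ys rfl rfl) not_false

-- a flatMap of constant blocks over a descending key list is descending
theorem pv_flatMap_replicate_pairwise (n : Char → Nat) (ds : List Char)
    (hd : ds.Pairwise (fun p q => q ≤ p)) :
    (ds.flatMap fun d => List.replicate (n d) d).Pairwise (fun p q => q ≤ p) := by
  induction ds with
  | nil => simp
  | cons d ds ih =>
      rw [List.pairwise_cons] at hd
      rw [List.flatMap_cons, List.pairwise_append]
      refine ⟨List.pairwise_replicate.mpr (Or.inr le_rfl), ih hd.2, ?_⟩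
      intro p hp q hq
      obtain rfl := (List.eq_of_mem_replicate hp)
      obtain ⟨e, he, hqe⟩ := List.mem_flatMap.mp hq
      obtain rfl := List.eq_of_mem_replicate hqe
      exact hd.1 _ he

-- counts in such a flatMap, when the keys are distinct
theorem pv_flatMap_replicate_count (n : Char → Nat) (ds : List Char) (hnd : ds.Nodup) (c : Char) :
    (ds.flatMap fun d => List.replicate (n d) d).count c = if c ∈ ds then n c else 0 := by
  induction ds with
  | nil => simp
  | cons d ds ih =>
      rw [List.nodup_cons] at hnd
      rw [List.flatMap_cons, List.count_append, List.count_replicate, ih hnd.2]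
      by_cases hc : c = d
      · subst hc; simp [hnd.1]
      · simp [hc, Ne.symm hc]

-- the two bodies agree for any nonnegative per-digit counts cX, cY  (A reduced to the canonical flatMap form)
theorem pv_core (cX cY : Char → Int) (hX0 : 0 ≤ cX '0') (hY0 : 0 ≤ cY '0') :
    (let res := "987654321".toList.foldl
        (fun acc n => acc ++ PySem.List.pyRepeat [n] (min (cX n) (cY n))) []
     if res ≠ [] then
       String.mk (res ++ PySem.List.pyRepeat ['0'] (min (cX '0') (cY '0')))
     else if cX '0' ≠ 0 ∧ cY '0' ≠ 0 then "0" else "-1")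
    =
    (let s := "9876543210".toList.flatMap
        (fun d => PySem.List.pyRepeat [d] (min (cX d) (cY d)))
     if s = [] then "-1"
     else if PySem.List.pyGet? s 0 = some '0' then "0"
     else String.mk s) := by
  have hL : "9876543210".toList = "987654321".toList ++ ['0'] := by decide
  simp only [hL, List.flatMap_append, PySem.List.foldl_append_eq_flatMap, List.nil_append,
    List.flatMap_cons, List.flatMap_nil, List.append_nil]
  set r := "987654321".toList.flatMap (fun n => PySem.List.pyRepeat [n] (min (cX n) (cY n))) with hr
  have hhead : ∀ x ∈ r, x ≠ '0' := by
    intro x hx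
    rw [hr] at hx
    simp [PySem.List.pyRepeat_singleton] at hx
    rcases hx with ⟨_,rfl⟩|⟨_,rfl⟩|⟨_,rfl⟩|⟨_,rfl⟩|⟨_,rfl⟩|⟨_,rfl⟩|⟨_,rfl⟩|⟨_,rfl⟩|⟨_,rfl⟩ <;> decide
  rcases hr' : r with _ | ⟨a, t⟩
  · simp only [List.nil_append, ne_eq, not_true_eq_false, if_false, PySem.List.pyRepeat_singleton]
    by_cases h : cX '0' ≠ 0 ∧ cY '0' ≠ 0
    · have hpos : 0 < min (cX '0') (cY '0') := by
        rcases h with ⟨h1, h2⟩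
        exact lt_min (lt_of_le_of_ne hX0 (Ne.symm h1)) (lt_of_le_of_ne hY0 (Ne.symm h2))
      have hk : ∃ k, (min (cX '0') (cY '0')).toNat = k + 1 :=
        ⟨(min (cX '0') (cY '0')).toNat - 1, by omega⟩
      obtain ⟨k, hk⟩ := hk
      simp [h, hk, List.replicate_succ, PySem.List.pyGet?, PySem.List.pyIdx?]
    · have hz : min (cX '0') (cY '0') = 0 := by
        rcases not_and_or.mp h with h1 | h1 <;>
          [have h1' := not_not.mp h1; have h1' := not_not.mp h1] <;> omega
      simp [h, hz]
  · have ha : a ≠ '0' := hhead a (by rw [hr']; exact List.mem_cons_self)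
    have h0 : (0:Int) ≤ (t.length : Int) + max (min (cX '0') (cY '0')) 0 := by
      have h1 : (0:Int) ≤ (t.length : Int) := Int.natCast_nonneg _
      have h2 : (0:Int) ≤ max (min (cX '0') (cY '0')) 0 := le_max_right _ _
      omega
    simp [PySem.List.pyGet?, PySem.List.pyIdx?, h0, ha]

-- B's merge intersection equals A's canonical per-digit flatMap
theorem pvISect_eq_canonical (X Y : String) :
    pvISect (PySem.List.sorted (X.toList.filter (fun c => decide (c ∈ "9876543210".toList))) (fun c => c) true)
            (PySem.List.sorted (Y.toList.filter (fun c => decide (c ∈ "9876543210".toList))) (fun c => c) true)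
    = "9876543210".toList.flatMap
        (fun d => PySem.List.pyRepeat [d] (min ((X.toList.count d : Int)) ((Y.toList.count d : Int)))) := by
  set p : Char → Bool := fun c => decide (c ∈ "9876543210".toList) with hp
  set xs := PySem.List.sorted (X.toList.filter p) (fun c => c) true with hxs
  set ys := PySem.List.sorted (Y.toList.filter p) (fun c => c) true with hys
  have hpx : xs.Pairwise (fun a b => b ≤ a) := PySem.List.sorted_pairwise_rev _ _
  have hpy : ys.Pairwise (fun a b => b ≤ a) := PySem.List.sorted_pairwise_rev _ _
  have hcount : ∀ (l : List Char) (c : Char),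
      (l.filter p).count c = if c ∈ "9876543210".toList then l.count c else 0 := by
    intro l c
    by_cases hc : c ∈ "9876543210".toList
    · rw [if_pos hc, List.count_filter (by simp only [hp]; exact decide_eq_true hc)]
    · rw [if_neg hc, List.count_eq_zero]
      intro hm
      exact hc (by simpa [hp] using (List.mem_filter.mp hm).2)
  have hcx : ∀ c, xs.count c = if c ∈ "9876543210".toList then X.toList.count c else 0 := by
    intro c
    rw [hxs, (PySem.List.sorted_perm _ _ _).count_eq, hcount]
  have hcy : ∀ c, ys.count c = if c ∈ "9876543210".toList then Y.toList.count c else 0 := by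
    intro c
    rw [hys, (PySem.List.sorted_perm _ _ _).count_eq, hcount]
  have hrep : ∀ d : Char,
      PySem.List.pyRepeat [d] (min ((X.toList.count d : Int)) ((Y.toList.count d : Int)))
        = List.replicate (min (X.toList.count d) (Y.toList.count d)) d := by
    intro d
    rw [PySem.List.pyRepeat_singleton]
    congr 1
    omega
  have hcan : "9876543210".toList.flatMap
      (fun d => PySem.List.pyRepeat [d] (min ((X.toList.count d : Int)) ((Y.toList.count d : Int))))
      = "9876543210".toList.flatMap
        (fun d => List.replicate (min (X.toList.count d) (Y.toList.count d)) d) := by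
    exact List.flatMap_congr (fun d _ => hrep d)
  rw [hcan]
  apply List.Perm.eq_of_pairwise (le := fun p q : Char => q ≤ p)
  · exact fun a b _ _ h1 h2 => le_antisymm h2 h1
  · exact hpx.sublist (pvISect_sublist xs ys)
  · exact pv_flatMap_replicate_pairwise _ _ (by decide)
  · rw [List.perm_iff_count]
    intro c
    rw [pvISect_count xs ys hpx hpy c,
      pv_flatMap_replicate_count (fun d => min (X.toList.count d) (Y.toList.count d))
        "9876543210".toList (by decide) c, hcx c, hcy c]
    by_cases hc : c ∈ "9876543210".toList
    · rw [if_pos hc, if_pos hc, if_pos hc]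
    · rw [if_neg hc, if_neg hc, if_neg hc]; simp

theorem pv_main (X Y : String) : solution X Y = solution_alt X Y := by
  unfold solution solution_alt freqA
  simp only [PySem.Dict.getD_counter, pvISect_eq_canonical X Y]
  exact pv_core (fun d => (X.toList.count d : Int)) (fun d => (Y.toList.count d : Int))
    (Int.natCast_nonneg _) (Int.natCast_nonneg _)

-- ===== VERDICT (by name: the statement is the Claim_ definition above) =====
theorem solution_spec : Claim_equal_solution := by
  intro X Y _
  exact (pv_main X Y).symm ▸ rfl
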